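-- pv_equiv track=rewrite | github.com/jackalsin/Python | 15112/Final Review/file.py | longestAnagramList
-- ===== SOURCE A (Python) =====
-- import copy
--
-- def longestAnagramList(L, prevWord = None):
--     if (L == []):
--         return L
--     else:
--         bestList = []
--
--         for word in L:
--             newL = copy.copy(L)
--             newL.remove(word)
--             if isAna(prevWord, word):
--                 result = longestAnagramList(newL,word)
--                 if result != None:
--                     result = [word] + result
--                     if (len(result) > len(bestList)):
--                         bestList = result
--
--         return bestList
--
-- def isAna(prevWord, word):
--     if prevWord == None:
--         return True
--
--     else:
--         count = 0
--         for c in word: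
--             if c not in prevWord:
--                 return False
--             else:
--                 count += 1
--         if count == len(prevWord) - 1:
--             return True
--         else:
--             return False
-- ===== SOURCE B (Python) =====
-- def longestAnagramList(L, prevWord=None):
--     if L == []:
--         return L
--     def isNext(w, v):
--         return len(v) == len(w) - 1 and all(c in w for c in v)
--     chain = {}
--     for w in sorted(dict.fromkeys(L), key=len):
--         best = []
--         for v in L:
--             if isNext(w, v):
--                 r = [v] + chain[v]
--                 if len(r) > len(best):
--                     best = r
--         chain[w] = best
--     best = []
--     for w in L:
--         if prevWord is None or isNext(prevWord, w):
--             r = [w] + chain[w]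
--             if len(r) > len(best):
--                 best = r
--     return best
-- ===== Notes on version B (the rewrite author's own statement) =====
-- stated objective: faster
-- what changed: Replaced the factorial-time brute force (try every word, recurse on the list with that word removed) by dynamic programming: since each chain step drops the word length by exactly 1, the best continuation of a word is independent of which longer words were already used, so B computes the best chain per distinct word once, in increasing length order, and then picks the best start.
import Mathlib
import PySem

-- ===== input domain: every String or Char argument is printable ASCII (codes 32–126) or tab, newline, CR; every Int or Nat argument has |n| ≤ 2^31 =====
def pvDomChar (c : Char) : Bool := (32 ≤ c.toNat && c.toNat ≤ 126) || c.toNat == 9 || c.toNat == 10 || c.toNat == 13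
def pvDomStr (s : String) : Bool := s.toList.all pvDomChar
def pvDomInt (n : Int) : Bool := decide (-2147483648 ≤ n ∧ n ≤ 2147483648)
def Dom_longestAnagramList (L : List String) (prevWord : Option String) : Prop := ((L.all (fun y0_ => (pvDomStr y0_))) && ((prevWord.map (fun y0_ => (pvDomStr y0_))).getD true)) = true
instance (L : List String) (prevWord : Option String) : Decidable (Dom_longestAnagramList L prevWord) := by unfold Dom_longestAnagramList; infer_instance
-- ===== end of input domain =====

-- B replaces A's factorial-time brute force by a length-ordered DP over distinct words (faster, asymptotic).

-- ===== PORT A =====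

-- isAna's character loop: 'for c in word: if c not in prevWord: return False else: count += 1'
def isAnaGo (p : String) (cs : List Char) (count : Int) : Bool :=
  match cs with
  | [] => count == PySem.Str.len p - 1
  | c :: rest => if (p.toList.contains c) = false then false else isAnaGo p rest (count + 1)

def isAna (prevWord : Option String) (word : String) : Bool :=
  match prevWord with
  | none => true
  | some p => isAnaGo p word.toList 0

-- A's 'for word in L' loop: cands is the remaining iteration suffix, L the current list,
-- best the bestList accumulator.  'newL.remove(word)' is List.erase (first occurrence).
-- (A's 'if result != None' is always true — longestAnagramList always returns a list — and is dropped.)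
-- The proof argument h (every candidate is in L) only justifies termination.
def portAux (L : List String) (cands : List String) (prev : Option String) (best : List String)
    (h : ∀ w ∈ cands, w ∈ L) : List String :=
  match cands with
  | [] => best
  | w :: rest =>
    let best' :=
      if isAna prev w then
        let newL := L.erase w
        -- recursive call longestAnagramList(newL, word): the callee first checks newL == []
        let sub := if newL = [] then newL else portAux newL newL (some w) [] (fun _ hx => hx)
        let result := w :: sub
        if best.length < result.length then result else best
      else best
    portAux L rest prev best' (fun x hx => h x (List.mem_cons_of_mem _ hx))
termination_by (L.length, cands.length)
decreasing_by
  · have hm := h w (List.mem_cons_self)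
    exact Prod.Lex.left _ _ (by
      rw [List.length_erase_of_mem hm]
      have := List.length_pos_of_mem hm
      omega)
  · exact Prod.Lex.right _ (by simp)

def longestAnagramList (L : List String) (prevWord : Option String) : List String :=
  if L = [] then L else portAux L L prevWord [] (fun _ hx => hx)

-- ===== PORT B =====

def isNext (w v : String) : Bool :=
  (PySem.Str.len v == PySem.Str.len w - 1) && v.toList.all (fun c => w.toList.contains c)

def longestAnagramList_alt (L : List String) (prevWord : Option String) : List String :=
  if L = [] then L
  else
    let ws := PySem.List.sorted (PySem.List.dedup L) (fun s => PySem.Str.len s) false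
    let chain := ws.foldl (fun (d : PySem.Dict String (List String)) w =>
      d.insert w (L.foldl (fun best v =>
        if isNext w v then
          let r := v :: d.getD v []
          if best.length < r.length then r else best
        else best) [])) PySem.Dict.empty
    L.foldl (fun best w =>
      if (match prevWord with | none => true | some p => isNext p w) then
        let r := w :: chain.getD w []
        if best.length < r.length then r else best
      else best) []

-- ===== PRECONDITION & SPEC =====
def Spec_longestAnagramList (L : List String) (prevWord : Option String) (out : List String) : Prop := out = longestAnagramList_alt L prevWord
instance (L : List String) (prevWord : Option String) (out : List String) : Decidable (Spec_longestAnagramList L prevWord out) := by unfold Spec_longestAnagramList; infer_instance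

-- ===== CLAIM (what is proved, stated in full; the proofs are below) =====
def Claim_equal_longestAnagramList : Prop := ∀ (L : List String) (prevWord : Option String), Dom_longestAnagramList L prevWord → Spec_longestAnagramList L prevWord (longestAnagramList L prevWord)

-- ===== LEMMAS AND PROOFS =====

-- A's recursion, started from scratch on a list
def chainA (L : List String) (w : String) : List String :=
  portAux L L (some w) [] (fun _ hx => hx)

-- the ideal per-word DP value: best chain continuing a word of length n, candidates drawn from all of L
def chainSpec (L : List String) : Nat → String → List String
  | 0, _ => []
  | n+1, w => L.foldl (fun best v =>
      if isNext w v then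
        let r := v :: chainSpec L n v
        if best.length < r.length then r else best
      else best) []

theorem portAux_eq_foldl (L : List String) (cands : List String) (prev : Option String)
    (best : List String) (h : ∀ w ∈ cands, w ∈ L) :
    portAux L cands prev best h = cands.foldl (fun best w =>
      if isAna prev w then
        let newL := L.erase w
        let sub := if newL = [] then newL else portAux newL newL (some w) [] (fun _ hx => hx)
        let result := w :: sub
        if best.length < result.length then result else best
      else best) best := by
  induction cands generalizing best with
  | nil => simp [portAux]
  | cons w rest ih => rw [portAux]; simp only [List.foldl_cons]; rw [ih]

theorem isAnaGo_eq (p : String) (cs : List Char) (count : Int) :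
    isAnaGo p cs count =
      (cs.all (fun c => p.toList.contains c) && (count + cs.length == PySem.Str.len p - 1)) := by
  induction cs generalizing count with
  | nil => simp [isAnaGo]
  | cons c rest ih =>
    rw [isAnaGo]
    by_cases hc : p.toList.contains c
    · rw [if_neg (by simp only [hc]; decide), ih, List.all_cons, hc, Bool.true_and, List.length_cons]
      have h2 : count + 1 + (rest.length : Int) = count + ((rest.length + 1 : Nat) : Int) := by
        push_cast; ring
      rw [h2]
    · have hcf : p.toList.contains c = false := by simpa using hc
      rw [if_pos hcf, List.all_cons, hcf, Bool.false_and, Bool.false_and]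

theorem isAna_some_eq (p v : String) : isAna (some p) v = isNext p v := by
  rw [isAna, isAnaGo_eq, isNext]
  simp [PySem.Str.len_eq, Bool.and_comm]

theorem isNext_len {w v : String} (h : isNext w v = true) :
    v.toList.length + 1 = w.toList.length := by
  rw [isNext] at h
  simp only [PySem.Str.len_eq, Bool.and_eq_true, beq_iff_eq] at h
  omega

-- erasing an element the filter rejects does not change the filter
theorem filter_erase_of_neg {p : String → Bool} {l : List String} {a : String}
    (hp : p a = false) : (l.erase a).filter p = l.filter p := by
  induction l with
  | nil => rfl
  | cons b t ih =>
    by_cases hba : b = a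
    · subst hba; simp [List.erase_cons_head, hp]
    · rw [List.erase_cons_tail (by simp [hba])]
      simp [List.filter_cons, ih]

-- if p implies q, equal q-filters give equal p-filters
theorem filter_subpred {p q : String → Bool} {l₁ l₂ : List String}
    (himp : ∀ a, p a = true → q a = true) (h : l₁.filter q = l₂.filter q) :
    l₁.filter p = l₂.filter p := by
  have key : ∀ l : List String, l.filter p = (l.filter q).filter p := by
    intro l
    rw [List.filter_filter]
    apply List.filter_congr
    intro a _
    by_cases hp : p a = true
    · simp [hp, himp a hp]
    · simp at hp; simp [hp]
  rw [key l₁, key l₂, h]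

def filt (n : Nat) (l : List String) : List String :=
  l.filter (fun v => decide (v.toList.length < n))

-- the central lemma: A's recursion only depends on the words shorter than the previous word,
-- so erasures of longer words are irrelevant and chainA equals the DP value
theorem chainA_eq_spec : ∀ (n : Nat) (L' L : List String) (w : String),
    w.toList.length = n → filt n L' = filt n L → chainA L' w = chainSpec L n w := by
  intro n
  induction n with
  | zero =>
    intro L' L w hw _
    rw [chainA, portAux_eq_foldl, chainSpec]
    rw [PySem.List.foldl_if_eq_foldl_filter (p := fun x => isAna (some w) x)
      (f := fun best x =>
        let newL := L'.erase x
        let sub := if newL = [] then newL else portAux newL newL (some x) [] (fun _ hx => hx)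
        let result := x :: sub
        if best.length < result.length then result else best)]
    have : L'.filter (fun x => isAna (some w) x) = [] := by
      apply List.filter_eq_nil_iff.mpr
      intro v _ hv
      have := isNext_len (by rwa [isAna_some_eq] at hv)
      omega
    rw [this]
    rfl
  | succ n ih =>
    intro L' L w hw hfilt
    rw [chainA, portAux_eq_foldl]
    rw [PySem.List.foldl_if_eq_foldl_filter (p := fun x => isAna (some w) x)
      (f := fun best x =>
        let newL := L'.erase x
        let sub := if newL = [] then newL else portAux newL newL (some x) [] (fun _ hx => hx)
        let result := x :: sub
        if best.length < result.length then result else best)]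
    have hfn : filt n L' = filt n L := by
      apply filter_subpred (q := fun v => decide (v.toList.length < n+1)) _ hfilt
      intro a ha; simp only [decide_eq_true_eq] at ha ⊢; omega
    have hff : L'.filter (fun x => isAna (some w) x) = L.filter (fun x => isAna (some w) x) := by
      apply filter_subpred (q := fun v => decide (v.toList.length < n+1)) _ hfilt
      intro a ha
      rw [isAna_some_eq] at ha
      have := isNext_len ha
      simp only [decide_eq_true_eq]; omega
    rw [hff]
    have hcongr : ∀ (best : List String) (x : String),
        x ∈ L.filter (fun x => isAna (some w) x) →
        (let newL := L'.erase x
         let sub := if newL = [] then newL else portAux newL newL (some x) [] (fun _ hx => hx)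
         let result := x :: sub
         if best.length < result.length then result else best) =
        (let r := x :: chainSpec L n x
         if best.length < r.length then r else best) := by
      intro best x hx
      rw [List.mem_filter] at hx
      have hnx : isNext w x = true := by rw [← isAna_some_eq]; exact hx.2
      have hxlen : x.toList.length = n := by have := isNext_len hnx; omega
      have hsub : (if L'.erase x = [] then L'.erase x
          else portAux (L'.erase x) (L'.erase x) (some x) [] (fun _ hx => hx)) =
          chainSpec L n x := by
        have habs : (if L'.erase x = [] then L'.erase x
            else portAux (L'.erase x) (L'.erase x) (some x) [] (fun _ hx => hx)) =
            chainA (L'.erase x) x := by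
          by_cases he : L'.erase x = []
          · rw [chainA, he]; simp [portAux]
          · rw [chainA, if_neg he]
        rw [habs]
        apply ih _ L x hxlen
        rw [← hfn]
        apply filter_erase_of_neg
        simp [hxlen]
      simp only [hsub]
    rw [PySem.List.foldl_congr_mem _ _ (fun best x =>
        (let r := x :: chainSpec L n x
         if best.length < r.length then r else best)) _ hcongr]
    have hswitch : L.filter (fun x => isAna (some w) x) = L.filter (fun x => isNext w x) := by
      apply List.filter_congr; intro a _; rw [isAna_some_eq]
    rw [hswitch, chainSpec,
      ← PySem.List.foldl_if_eq_foldl_filter (p := fun x => isNext w x)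
        (f := fun best x =>
          (let r := x :: chainSpec L n x
           if best.length < r.length then r else best))]

-- B's DP-dict loop step
def stepB (L : List String) (d : PySem.Dict String (List String)) (w : String) :
    PySem.Dict String (List String) :=
  d.insert w (L.foldl (fun best v =>
    if isNext w v then
      let r := v :: d.getD v []
      if best.length < r.length then r else best
    else best) [])

-- B's dict, built over any length-sorted word list, stores the DP values
theorem chainDict (L : List String) : ∀ (ws : List String) (d : PySem.Dict String (List String)),
    List.Pairwise (fun a b => PySem.Str.len a ≤ PySem.Str.len b) ws →
    (∀ v ∈ L, v ∈ ws ∨ d.getD v [] = chainSpec L v.toList.length v) →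
    ∀ w ∈ L, (ws.foldl (stepB L) d).getD w [] = chainSpec L w.toList.length w := by
  intro ws
  induction ws with
  | nil =>
    intro d _ h4 w hw
    rcases h4 w hw with h | h
    · simp at h
    · simpa using h
  | cons u rest ih =>
    intro d hpw h4 w hw
    have hpwu : ∀ b ∈ rest, PySem.Str.len u ≤ PySem.Str.len b := (List.pairwise_cons.mp hpw).1
    have hbu : (L.foldl (fun best v =>
        if isNext u v then
          let r := v :: d.getD v []
          if best.length < r.length then r else best
        else best) []) = chainSpec L u.toList.length u := by
      cases hn : u.toList.length with
      | zero =>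
        rw [chainSpec]
        rw [PySem.List.foldl_congr_mem _ _ (fun best _ => best)]
        · exact PySem.List.foldl_ignore L []
        · intro best v _
          have : isNext u v = false := by
            cases h : isNext u v
            · rfl
            · have := isNext_len h; omega
          simp [this]
      | succ n =>
        rw [chainSpec]
        apply PySem.List.foldl_congr_mem
        intro best v hv
        cases h : isNext u v
        · simp
        · have hvlen : v.toList.length = n := by have := isNext_len h; omega
          have hvd : d.getD v [] = chainSpec L v.toList.length v := by
            rcases h4 v hv with hmem | hd
            · rcases List.mem_cons.mp hmem with rfl | hr
              · omega
              · exfalso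
                have := hpwu v hr
                simp only [PySem.Str.len_eq, Nat.cast_le] at this
                omega
            · exact hd
          simp [hvd, hvlen]
    rw [List.foldl_cons]
    apply ih _ (List.Pairwise.of_cons hpw) _ w hw
    intro v hv
    rcases h4 v hv with hmem | hd
    · rcases List.mem_cons.mp hmem with rfl | hr
      · right
        rw [stepB, PySem.Dict.getD_insert_self, hbu]
      · left; exact hr
    · right
      rw [stepB, PySem.Dict.getD_insert]
      by_cases hvu : v = u
      · subst hvu
        rw [if_pos rfl]
        exact hbu
      · rw [if_neg hvu]
        exact hd

-- ===== VERDICT (by name: the statement is the Claim_ definition above) =====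
theorem longestAnagramList_spec : Claim_equal_longestAnagramList := by
  intro L prevWord _
  unfold Spec_longestAnagramList
  by_cases hL : L = []
  · simp [longestAnagramList, longestAnagramList_alt, hL]
  · simp only [longestAnagramList, longestAnagramList_alt, if_neg hL]
    rw [portAux_eq_foldl]
    apply PySem.List.foldl_congr_mem
    intro best w hw
    simp only []
    have habs : (if L.erase w = [] then L.erase w
        else portAux (L.erase w) (L.erase w) (some w) [] (fun _ hx => hx)) =
        chainA (L.erase w) w := by
      by_cases he : L.erase w = []
      · rw [chainA, he]; simp [portAux]
      · rw [chainA, if_neg he]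
    have hchain : chainA (L.erase w) w = chainSpec L w.toList.length w := by
      apply chainA_eq_spec _ _ L w rfl
      apply filter_erase_of_neg
      simp
    have hsub := habs.trans hchain
    have hstep : (fun (d : PySem.Dict String (List String)) w =>
        d.insert w (L.foldl (fun best v =>
          if isNext w v then
            let r := v :: d.getD v []
            if best.length < r.length then r else best
          else best) [])) = stepB L := rfl
    have hdict : ((PySem.List.sorted (PySem.List.dedup L) (fun s => PySem.Str.len s) false).foldl
        (stepB L) PySem.Dict.empty).getD w [] = chainSpec L w.toList.length w := by
      apply chainDict L _ _ (PySem.List.sorted_pairwise _ _) _ w hw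
      intro v hv
      left
      rw [PySem.List.mem_sorted, PySem.List.dedup_eq_ofList, PySem.Set.mem_ofList]
      exact hv
    cases prevWord with
    | none => simp only [isAna, hsub, hstep, hdict]
    | some p => simp only [isAna_some_eq, hsub, hstep, hdict]
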